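-- pv_equiv track=rewrite | github.com/tnuh1977/onyx | backend/onyx/file_processing/extract_file_text.py | _remove_empty_runs
-- ===== SOURCE A (Python) =====
-- def _remove_empty_runs(
--     rows: list[list[str]],
--     max_empty: int,
-- ) -> list[list[str]]:
--     """Removes entire runs of empty rows when the run length exceeds max_empty.
--
--     Leading empty runs are capped to max_empty, just like interior runs.
--     Trailing empty rows are always dropped since there is no subsequent
--     non-empty row to flush them.
--     """
--     result: list[list[str]] = []
--     empty_buffer: list[list[str]] = []
--
--     for row in rows:
--         # Check if empty
--         if not any(row):
--             if len(empty_buffer) < max_empty: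
--                 empty_buffer.append(row)
--         else:
--             # Add upto max empty rows onto the result - that's what we allow
--             result.extend(empty_buffer[:max_empty])
--             # Add the new non-empty row
--             result.append(row)
--             empty_buffer = []
--
--     return result
-- ===== SOURCE B (Python) =====
-- from itertools import groupby
--
--
-- def _remove_empty_runs(
--     rows: list[list[str]],
--     max_empty: int,
-- ) -> list[list[str]]:
--     """Cap runs of empty rows to max_empty; trailing empty rows are dropped."""
--     cap = max(max_empty, 0)
--     result: list[list[str]] = []
--     pending: list[list[str]] = []
--     for is_empty, run in groupby(rows, key=lambda r: not any(r)):
--         if is_empty: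
--             pending = list(run)
--         else:
--             result.extend(pending[:cap])
--             result.extend(run)
--             pending = []
--     return result
-- ===== Notes on version B (the rewrite author's own statement) =====
-- stated objective: idiomatic
-- what changed: B splits the input into maximal runs via itertools.groupby and flushes a capped pending empty run before each non-empty run, instead of A's row-by-row loop that grows a capacity-limited buffer and slices it on every non-empty row.
import Mathlib
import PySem

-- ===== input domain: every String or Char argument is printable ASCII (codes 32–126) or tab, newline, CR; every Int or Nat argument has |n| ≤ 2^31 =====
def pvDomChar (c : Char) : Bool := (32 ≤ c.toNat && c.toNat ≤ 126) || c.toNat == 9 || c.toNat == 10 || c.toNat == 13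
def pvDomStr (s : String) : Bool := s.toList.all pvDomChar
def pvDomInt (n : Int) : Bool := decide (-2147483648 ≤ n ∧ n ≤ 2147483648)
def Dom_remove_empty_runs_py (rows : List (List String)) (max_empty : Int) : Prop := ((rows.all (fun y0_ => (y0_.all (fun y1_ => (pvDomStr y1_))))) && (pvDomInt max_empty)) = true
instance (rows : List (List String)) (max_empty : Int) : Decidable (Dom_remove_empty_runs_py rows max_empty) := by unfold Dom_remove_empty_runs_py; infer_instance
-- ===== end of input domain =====

-- B replaces A's row-by-row buffer loop by a run-based (groupby) loop; objective: idiomatic.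

-- ===== PORT A =====
-- Python truthiness of a row: `any(row)` is true iff some cell is a nonempty string.
def pvRowEmpty (row : List String) : Bool := !(row.any (fun s => s != ""))

-- one iteration of A's for-loop over state (result, empty_buffer)
def remove_empty_runs_py_step (max_empty : Int) (st : List (List String) × List (List String))
    (row : List String) : List (List String) × List (List String) :=
  if pvRowEmpty row then
    if (st.2.length : Int) < max_empty then (st.1, st.2 ++ [row]) else st
  else
    (st.1 ++ PySem.List.slice st.2 none (some max_empty) ++ [row], [])

def remove_empty_runs_py (rows : List (List String)) (max_empty : Int) : List (List String) :=
  (rows.foldl (remove_empty_runs_py_step max_empty) ([], [])).1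

-- ===== PORT B =====
-- B's groupby loop: each step consumes one maximal run (takeWhile/dropWhile on the
-- head's emptiness), carrying the pending empty run.
def remove_empty_runs_py_bLoop (cap : Nat) : List (List String) → List (List String) → List (List String)
  | [], _pending => []
  | r :: rs, pending =>
    if pvRowEmpty r then
      remove_empty_runs_py_bLoop cap (rs.dropWhile pvRowEmpty) ((r :: rs).takeWhile pvRowEmpty)
    else
      pending.take cap ++ (r :: rs).takeWhile (fun x => !pvRowEmpty x)
        ++ remove_empty_runs_py_bLoop cap (rs.dropWhile (fun x => !pvRowEmpty x)) []
termination_by rows _ => rows.length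
decreasing_by
  · simpa using Nat.lt_succ_of_le (rs.length_dropWhile_le pvRowEmpty)
  · simpa using Nat.lt_succ_of_le (rs.length_dropWhile_le (fun x => !pvRowEmpty x))

def remove_empty_runs_py_alt (rows : List (List String)) (max_empty : Int) : List (List String) :=
  remove_empty_runs_py_bLoop (max max_empty 0).toNat rows []

-- ===== PRECONDITION & SPEC =====
def Spec_remove_empty_runs_py (rows : List (List String)) (max_empty : Int) (out : List (List String)) : Prop := out = remove_empty_runs_py_alt rows max_empty
instance (rows : List (List String)) (max_empty : Int) (out : List (List String)) : Decidable (Spec_remove_empty_runs_py rows max_empty out) := by unfold Spec_remove_empty_runs_py; infer_instance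

-- ===== CLAIM (what is proved, stated in full; the proofs are below) =====
def Claim_equal_remove_empty_runs_py : Prop := ∀ (rows : List (List String)) (max_empty : Int), Dom_remove_empty_runs_py rows max_empty → Spec_remove_empty_runs_py rows max_empty (remove_empty_runs_py rows max_empty)

-- ===== LEMMAS AND PROOFS =====

-- head of dropWhile fails the predicate
lemma pv_head_dropWhile {α : Type} (p : α → Bool) :
    ∀ (l : List α) (r : α) (rs : List α), l.dropWhile p = r :: rs → p r = false := by
  intro l
  induction l with
  | nil => intro r rs h; simp [List.dropWhile] at h
  | cons a t ih =>
    intro r rs h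
    by_cases ha : p a
    · rw [List.dropWhile_cons_of_pos ha] at h; exact ih r rs h
    · rw [List.dropWhile_cons_of_neg ha] at h
      cases h; simpa using ha

-- A's loop over a run of empty rows only fills the buffer
lemma pv_foldl_empty_run (me : Int) :
    ∀ (e : List (List String)), (∀ r ∈ e, pvRowEmpty r = true) →
    ∀ (res buf : List (List String)),
      List.foldl (remove_empty_runs_py_step me) (res, buf) e
        = (res, buf ++ e.take (me.toNat - buf.length)) := by
  intro e
  induction e with
  | nil => intro _ res buf; simp
  | cons r tl ih =>
    intro he res buf
    have hr : pvRowEmpty r = true := he r (by simp)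
    have htl : ∀ x ∈ tl, pvRowEmpty x = true := fun x hx => he x (by simp [hx])
    simp only [List.foldl_cons, remove_empty_runs_py_step, hr, if_pos]
    by_cases hlt : (buf.length : Int) < me
    · rw [if_pos hlt]
      rw [ih htl res (buf ++ [r])]
      have hK : buf.length < me.toNat := by omega
      have h1 : me.toNat - buf.length = (me.toNat - (buf ++ [r]).length) + 1 := by
        simp only [List.length_append, List.length_cons, List.length_nil]
        omega
      rw [h1, List.take_succ_cons]
      simp
    · rw [if_neg hlt]
      rw [ih htl res buf]
      have h0 : me.toNat - buf.length = 0 := by omega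
      simp [h0]

-- A's loop over non-empty rows with an empty buffer just appends them
lemma pv_foldl_nonempty_run (me : Int) :
    ∀ (n : List (List String)), (∀ r ∈ n, pvRowEmpty r = false) →
    ∀ (res : List (List String)),
      List.foldl (remove_empty_runs_py_step me) (res, []) n = (res ++ n, []) := by
  intro n
  induction n with
  | nil => intro _ res; simp
  | cons r tl ih =>
    intro hn res
    have hr : pvRowEmpty r = false := hn r (by simp)
    have htl : ∀ x ∈ tl, pvRowEmpty x = false := fun x hx => hn x (by simp [hx])
    simp only [List.foldl_cons, remove_empty_runs_py_step, hr]
    rw [if_neg (by simp)]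
    have hs : PySem.List.slice ([] : List (List String)) none (some me) = [] := by
      simp [PySem.List.slice]
    rw [hs, ih htl]
    simp

-- slicing a buffer that never exceeded the cap is the identity
lemma pv_slice_id (me : Int) (buf : List (List String)) (h : buf.length ≤ me.toNat) :
    PySem.List.slice buf none (some me) = buf := by
  by_cases hme : 0 ≤ me
  · rw [PySem.List.slice_to buf hme]
    exact List.take_of_length_le h
  · have : me.toNat = 0 := by omega
    have hb : buf = [] := by
      have := List.length_eq_zero_iff.mp (Nat.le_zero.mp (this ▸ h))
      exact this
    subst hb; simp [PySem.List.slice]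

-- main invariant: A's fold with buffer `e.take me.toNat` equals res ++ B's run loop
-- with pending run e, provided rows does not start with an empty row unless e = []
lemma pv_main (me : Int) :
    ∀ (n : Nat) (rows : List (List String)), rows.length ≤ n →
    ∀ (res e : List (List String)), (∀ r ∈ e, pvRowEmpty r = true) →
      (∀ r rs, rows = r :: rs → pvRowEmpty r = true → e = []) →
      (List.foldl (remove_empty_runs_py_step me) (res, e.take me.toNat) rows).1
        = res ++ remove_empty_runs_py_bLoop me.toNat rows e := by
  intro n
  induction n with
  | zero =>
    intro rows hlen res e _ _
    have : rows = [] := List.length_eq_zero_iff.mp (Nat.le_zero.mp hlen)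
    subst this
    simp [remove_empty_runs_py_bLoop]
  | succ m ih =>
    intro rows hlen res e he hshape
    cases rows with
    | nil => simp [remove_empty_runs_py_bLoop]
    | cons r rs =>
      by_cases hb : pvRowEmpty r
      · -- empty run: e = [], buffer starts empty, fills with the run
        have he0 : e = [] := hshape r rs rfl hb
        subst he0
        have hsplit : r :: rs
            = (r :: rs).takeWhile pvRowEmpty ++ (r :: rs).dropWhile pvRowEmpty :=
          (List.takeWhile_append_dropWhile).symm
        have hdw : (r :: rs).dropWhile pvRowEmpty = rs.dropWhile pvRowEmpty := by
          rw [List.dropWhile_cons_of_pos hb]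
        calc (List.foldl (remove_empty_runs_py_step me) (res, List.take me.toNat []) (r :: rs)).1
            = (List.foldl (remove_empty_runs_py_step me) (res, [])
                ((r :: rs).takeWhile pvRowEmpty ++ (r :: rs).dropWhile pvRowEmpty)).1 := by
              rw [← hsplit]; simp
          _ = res ++ remove_empty_runs_py_bLoop me.toNat (r :: rs) [] := by
              rw [List.foldl_append]
              rw [pv_foldl_empty_run me _ (fun x hx => List.mem_takeWhile_imp hx) res []]
              simp only [List.nil_append, List.length_nil, Nat.sub_zero]
              rw [hdw]
              have hlen' : (rs.dropWhile pvRowEmpty).length ≤ m := by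
                have := rs.length_dropWhile_le pvRowEmpty
                simp at hlen; omega
              rw [ih (rs.dropWhile pvRowEmpty) hlen' res ((r :: rs).takeWhile pvRowEmpty)
                    (fun x hx => List.mem_takeWhile_imp hx)
                    (by
                      intro r' rs' hr' hem
                      exfalso
                      have := pv_head_dropWhile pvRowEmpty rs r' rs' hr'
                      rw [hem] at this; exact Bool.false_ne_true this.symm)]
              rw [remove_empty_runs_py_bLoop]
              simp [hb]
      · -- non-empty run: flush pending (= e.take cap), append the run, recurse with []
        have hbf : pvRowEmpty r = false := by simpa using hb
        have hsplit : r :: rs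
            = (r :: rs).takeWhile (fun x => !pvRowEmpty x)
              ++ (r :: rs).dropWhile (fun x => !pvRowEmpty x) :=
          (List.takeWhile_append_dropWhile).symm
        have htw : (r :: rs).takeWhile (fun x => !pvRowEmpty x)
            = r :: rs.takeWhile (fun x => !pvRowEmpty x) := by
          rw [List.takeWhile_cons_of_pos (by simp [hbf])]
        have hdw : (r :: rs).dropWhile (fun x => !pvRowEmpty x)
            = rs.dropWhile (fun x => !pvRowEmpty x) := by
          rw [List.dropWhile_cons_of_pos (by simp [hbf])]
        conv_lhs => rw [hsplit]
        rw [List.foldl_append, htw, hdw]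
        -- first step of the non-empty run flushes the buffer
        simp only [List.foldl_cons, remove_empty_runs_py_step, hbf]
        rw [if_neg (by simp)]
        rw [pv_slice_id me (e.take me.toNat) (by simp)]
        rw [pv_foldl_nonempty_run me _
              (fun x hx => by
                have := List.mem_takeWhile_imp hx
                simpa using this)]
        have hlen' : (rs.dropWhile (fun x => !pvRowEmpty x)).length ≤ m := by
          have := rs.length_dropWhile_le (fun x => !pvRowEmpty x)
          simp at hlen; omega
        have hrest := ih (rs.dropWhile (fun x => !pvRowEmpty x)) hlen'
            (res ++ e.take me.toNat ++ [r] ++ rs.takeWhile (fun x => !pvRowEmpty x)) []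
            (by intro x hx; simp at hx)
            (by intro _ _ _ _; rfl)
        simp only [List.take_nil] at hrest
        rw [hrest]
        rw [remove_empty_runs_py_bLoop]
        simp [hbf, htw]

theorem pv_toNat_max (me : Int) : (max me 0).toNat = me.toNat := by omega

-- ===== VERDICT (by name: the statement is the Claim_ definition above) =====
theorem remove_empty_runs_py_spec : Claim_equal_remove_empty_runs_py := by
  intro rows me _
  unfold Spec_remove_empty_runs_py remove_empty_runs_py remove_empty_runs_py_alt
  rw [pv_toNat_max]
  have := pv_main me rows.length rows le_rfl [] []
      (by intro x hx; simp at hx) (by intro _ _ _ _; rfl)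
  simpa using this
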